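-- pv_equiv track=rewrite | github.com/PR0GRamISTT/main- | Test2.py | max_rook_sum
-- ===== SOURCE A (Python) =====
-- def max_rook_sum(n, k):
--     # Создаем доску n x n
--     board = [[(i + 1) * (j + 1) for j in range(n)] for i in range(n)]
--
--     # Список для хранения выбранных позиций ладей
--     rooks_positions = []
--     used_rows = set()
--     used_cols = set()
--
--     # Найдем максимальные элементы
--     for _ in range(k):
--         max_value = -1
--         max_position = (-1, -1)
--
--         for i in range(n):
--             for j in range(n):
--                 if i not in used_rows and j not in used_cols:
--                     if board[i][j] > max_value:
--                         max_value = board[i][j]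
--                         max_position = (i, j)
--
--         # Запоминаем позицию и отмечаем строку и столбец как занятые
--         if max_position != (-1, -1):
--             rooks_positions.append(max_position)
--             used_rows.add(max_position[0])
--             used_cols.add(max_position[1])
--
--     # Вычисляем сумму значений на полях с ладьями
--     total_sum = sum(board[i][j] for i, j in rooks_positions)
--
--     return total_sum, rooks_positions
-- ===== SOURCE B (Python) =====
-- def max_rook_sum(n, k):
--     # The greedy always picks the anti-diagonal cells (n-1,n-1),(n-2,n-2),...:
--     # with rows/cols {0..c-1} free, the max of (i+1)(j+1) is at (c-1,c-1).
--     m = min(n, k)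
--     if m < 0:
--         m = 0
--     positions = [(n - 1 - t, n - 1 - t) for t in range(m)]
--     total = sum((n - t) * (n - t) for t in range(m))
--     return total, positions
-- ===== Notes on version B (the rewrite author's own statement) =====
-- stated objective: faster
-- what changed: Replaces the greedy O(k*n^2)-per-pick search over the whole board by the closed form: the chosen positions are exactly the descending diagonal (n-1,n-1),...,(n-m,n-m) with m=min(n,k) (clamped at 0), and the sum is sum of (n-t)^2.
import Mathlib
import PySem

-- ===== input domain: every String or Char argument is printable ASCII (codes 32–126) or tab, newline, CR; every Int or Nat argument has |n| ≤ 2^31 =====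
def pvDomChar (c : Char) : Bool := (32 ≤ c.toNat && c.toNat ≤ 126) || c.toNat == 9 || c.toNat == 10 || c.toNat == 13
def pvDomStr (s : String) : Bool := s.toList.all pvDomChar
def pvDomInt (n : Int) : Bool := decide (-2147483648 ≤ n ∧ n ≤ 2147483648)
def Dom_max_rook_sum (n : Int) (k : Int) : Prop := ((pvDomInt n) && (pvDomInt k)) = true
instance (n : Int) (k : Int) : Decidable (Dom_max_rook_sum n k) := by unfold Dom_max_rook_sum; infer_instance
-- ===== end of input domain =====

-- B replaces A's greedy repeated whole-board scan by the closed form it computes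
-- (the picks are the descending diagonal, the sum is a sum of squares); proved equal below.

-- ===== PORT A =====
-- board = [[(i+1)*(j+1) for j in range(n)] for i in range(n)]
def pvBoard (n : Int) : List (List Int) :=
  (PySem.List.pyRange 0 n 1).map (fun i => (PySem.List.pyRange 0 n 1).map (fun j => (i + 1) * (j + 1)))

-- board[i][j]; A only ever indexes in range, so the pyGetD defaults are never reached
def pvCell (board : List (List Int)) (i j : Int) : Int :=
  PySem.List.pyGetD (PySem.List.pyGetD board i []) j 0

-- the inner 'for j in range(n)' of A's scan, for one row i
def pvScanRow (board : List (List Int)) (n : Int) (usedR usedC : PySem.Set Int) (acc : Int × (Int × Int)) (i : Int) :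
    Int × (Int × Int) :=
  (PySem.List.pyRange 0 n 1).foldl (fun acc2 j =>
    if !(PySem.Set.contains usedR i) && !(PySem.Set.contains usedC j) then
      (if pvCell board i j > acc2.1 then (pvCell board i j, (i, j)) else acc2)
    else acc2) acc

-- the full 'for i in range(n): for j in range(n)' scan, from max_value = -1, max_position = (-1, -1)
def pvScan (board : List (List Int)) (n : Int) (usedR usedC : PySem.Set Int) : Int × (Int × Int) :=
  (PySem.List.pyRange 0 n 1).foldl (pvScanRow board n usedR usedC) (-1, (-1, -1))

-- one iteration of 'for _ in range(k)'; state = (rooks_positions, used_rows, used_cols)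
def pvStep (board : List (List Int)) (n : Int) (st : List (Int × Int) × PySem.Set Int × PySem.Set Int) :
    List (Int × Int) × PySem.Set Int × PySem.Set Int :=
  let best := pvScan board n st.2.1 st.2.2
  if best.2 ≠ (-1, -1) then
    (st.1 ++ [best.2], PySem.Set.add st.2.1 best.2.1, PySem.Set.add st.2.2 best.2.2)
  else st

def max_rook_sum (n : Int) (k : Int) : Int × (List (Int × Int)) :=
  let board := pvBoard n
  let final := (PySem.List.pyRange 0 k 1).foldl (fun st _ => pvStep board n st)
    ([], PySem.Set.empty, PySem.Set.empty)
  (final.1.foldl (fun acc p => acc + pvCell board p.1 p.2) 0, final.1)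

-- ===== PORT B =====
def max_rook_sum_alt (n : Int) (k : Int) : Int × (List (Int × Int)) :=
  let m : Int := if min n k < 0 then 0 else min n k
  let positions := (PySem.List.pyRange 0 m 1).map (fun t => (n - 1 - t, n - 1 - t))
  let total := ((PySem.List.pyRange 0 m 1).map (fun t => (n - t) * (n - t))).sum
  (total, positions)

-- ===== PRECONDITION & SPEC =====
def Spec_max_rook_sum (n : Int) (k : Int) (out : Int × (List (Int × Int))) : Prop := out = max_rook_sum_alt n k
instance (n : Int) (k : Int) (out : Int × (List (Int × Int))) : Decidable (Spec_max_rook_sum n k out) := by unfold Spec_max_rook_sum; infer_instance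

-- ===== CLAIM (what is proved, stated in full; the proofs are below) =====
def Claim_equal_max_rook_sum : Prop := ∀ (n : Int) (k : Int), Dom_max_rook_sum n k → Spec_max_rook_sum n k (max_rook_sum n k)

-- ===== LEMMAS AND PROOFS =====

-- used_rows (= used_cols) after t successful picks: {n-1, n-2, …, n-t}, in insertion order
def usedL (n : Int) (t : Nat) : List Int := (List.range t).map (fun s : Nat => n - 1 - (s : Int))

-- rooks_positions after t successful picks
def posL (n : Int) (t : Nat) : List (Int × Int) :=
  (List.range t).map (fun s : Nat => (n - 1 - (s : Int), n - 1 - (s : Int)))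

-- the row scan restricted to the free columns 0..c-1, with the used-checks and board lookups gone
def pureScan (i : Int) (c : Nat) (acc : Int × (Int × Int)) : Int × (Int × Int) :=
  (List.range c).foldl (fun acc2 (s : Nat) =>
    if (i + 1) * ((s : Int) + 1) > acc2.1 then ((i + 1) * ((s : Int) + 1), (i, (s : Int))) else acc2) acc

lemma pvCell_eq (n i j : Int) (hi0 : 0 ≤ i) (hin : i < n) (hj0 : 0 ≤ j) (hjn : j < n) :
    pvCell (pvBoard n) i j = (i + 1) * (j + 1) := by
  unfold pvCell pvBoard
  rw [PySem.List.pyGetD_map_pyRange_of_nonneg _ n i _ hi0 hin,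
      PySem.List.pyGetD_map_pyRange_of_nonneg _ n j _ hj0 hjn]

lemma mem_usedL (n : Int) (t : Nat) (i : Int) : i ∈ usedL n t ↔ n - (t : Int) ≤ i ∧ i < n := by
  simp only [usedL, List.mem_map, List.mem_range]
  constructor
  · rintro ⟨s, hs, rfl⟩
    omega
  · intro h
    exact ⟨(n - 1 - i).toNat, by omega, by omega⟩

lemma contains_usedL (n : Int) (t : Nat) (i : Int) :
    PySem.Set.contains (usedL n t) i = decide (n - (t : Int) ≤ i ∧ i < n) := by
  have h1 : PySem.Set.contains (usedL n t) i = true ↔ (n - (t : Int) ≤ i ∧ i < n) := by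
    rw [PySem.Set.contains_iff, mem_usedL]
  by_cases h : n - (t : Int) ≤ i ∧ i < n
  · simp only [h]; exact h1.mpr h
  · simp only [h, decide_false]
    exact Bool.eq_false_iff.mpr (fun hc => h (h1.mp hc))

lemma pvScanRow_used (board : List (List Int)) (n : Int) (usedR usedC : PySem.Set Int) (acc : Int × (Int × Int)) (i : Int)
    (h : PySem.Set.contains usedR i = true) : pvScanRow board n usedR usedC acc i = acc := by
  unfold pvScanRow
  have hcong := PySem.List.foldl_congr_mem' (l := PySem.List.pyRange 0 n 1) (init := acc)
    (g := fun (acc2 : Int × (Int × Int)) (_ : Int) => acc2)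
    (f := fun acc2 j =>
      if !(PySem.Set.contains usedR i) && !(PySem.Set.contains usedC j) then
        (if pvCell board i j > acc2.1 then (pvCell board i j, (i, j)) else acc2)
      else acc2)
    (fun j _ acc2 => by rw [h]; simp)
  rw [hcong]
  exact PySem.List.foldl_ignore _ _

lemma pureScan_eq (i : Int) (hi : 0 ≤ i) :
    ∀ (c : Nat), 1 ≤ c → ∀ acc, pureScan i c acc =
      if acc.1 < (i + 1) * (c : Int) then ((i + 1) * (c : Int), (i, (c : Int) - 1)) else acc := by
  intro c
  induction c with
  | zero => intro h; omega
  | succ c ih =>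
    intro _ acc
    rcases Nat.eq_zero_or_pos c with rfl | hc
    · simp only [pureScan]
      norm_num
    · have step : pureScan i (c + 1) acc =
          (fun acc2 (s : Nat) => if (i + 1) * ((s : Int) + 1) > acc2.1
            then ((i + 1) * ((s : Int) + 1), (i, (s : Int))) else acc2) (pureScan i c acc) c := by
        unfold pureScan
        rw [List.range_succ, List.foldl_append, List.foldl_cons, List.foldl_nil]
      rw [step, ih hc acc]
      have hc1 : (1 : Int) ≤ (c : Int) := by exact_mod_cast hc
      by_cases h1 : acc.1 < (i + 1) * (c : Int)
      · have h2 : (i + 1) * (c : Int) < (i + 1) * ((c : Int) + 1) := by nlinarith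
        have h3 : acc.1 < (i + 1) * ((c : Int) + 1) := lt_trans h1 h2
        simp only [h1, if_true, gt_iff_lt]
        push_cast
        simp only [h2, if_true, h3, if_true]
        norm_num
      · simp only [h1, if_false, gt_iff_lt]
        push_cast
        by_cases h4 : acc.1 < (i + 1) * ((c : Int) + 1) <;> simp [h4]

lemma pvScanRow_free (n : Int) (t : Nat) (acc : Int × (Int × Int)) (i : Int)
    (hi0 : 0 ≤ i) (hif : i < n - (t : Int)) :
    pvScanRow (pvBoard n) n (usedL n t) (usedL n t) acc i = pureScan i (n - (t : Int)).toNat acc := by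
  have hrow : PySem.Set.contains (usedL n t) i = false := by
    rw [contains_usedL]; simp only [decide_eq_false_iff_not]; omega
  unfold pvScanRow
  rw [PySem.List.pyRange_one, List.foldl_map]
  have hsplit : (n - 0).toNat = (n - (t : Int)).toNat + (n.toNat - (n - (t : Int)).toNat) := by omega
  rw [hsplit, List.range_add, List.foldl_append, List.foldl_map]
  have tail_eq : ∀ (a : Int × (Int × Int)),
      (List.range (n.toNat - (n - (t : Int)).toNat)).foldl
        (fun acc2 s =>
          if !(PySem.Set.contains (usedL n t) i) &&
              !(PySem.Set.contains (usedL n t) ((0 : Int) + (((n - (t : Int)).toNat + s : Nat) : Int)))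
          then (if pvCell (pvBoard n) i ((0 : Int) + (((n - (t : Int)).toNat + s : Nat) : Int)) > acc2.1
            then (pvCell (pvBoard n) i ((0 : Int) + (((n - (t : Int)).toNat + s : Nat) : Int)),
              (i, (0 : Int) + (((n - (t : Int)).toNat + s : Nat) : Int))) else acc2)
          else acc2) a = a := by
    intro a
    have hcong := PySem.List.foldl_congr_mem'
      (l := List.range (n.toNat - (n - (t : Int)).toNat)) (init := a)
      (g := fun (acc2 : Int × (Int × Int)) (_ : Nat) => acc2)
      (f := fun acc2 s =>
        if !(PySem.Set.contains (usedL n t) i) &&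
            !(PySem.Set.contains (usedL n t) ((0 : Int) + (((n - (t : Int)).toNat + s : Nat) : Int)))
        then (if pvCell (pvBoard n) i ((0 : Int) + (((n - (t : Int)).toNat + s : Nat) : Int)) > acc2.1
          then (pvCell (pvBoard n) i ((0 : Int) + (((n - (t : Int)).toNat + s : Nat) : Int)),
            (i, (0 : Int) + (((n - (t : Int)).toNat + s : Nat) : Int))) else acc2)
        else acc2)
      (fun s hs acc2 => by
        have hcol : PySem.Set.contains (usedL n t)
            ((0 : Int) + (((n - (t : Int)).toNat + s : Nat) : Int)) = true := by
          rw [contains_usedL]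
          simp only [decide_eq_true_eq]
          rw [List.mem_range] at hs
          push_cast
          omega
        simp only [hcol, Bool.not_true, Bool.and_false]
        simp)
    rw [hcong]
    exact PySem.List.foldl_ignore _ _
  rw [tail_eq]
  unfold pureScan
  apply PySem.List.foldl_congr_mem'
  intro s hs acc2
  rw [List.mem_range] at hs
  have hcol : PySem.Set.contains (usedL n t) ((0 : Int) + (s : Int)) = false := by
    rw [contains_usedL]; simp only [decide_eq_false_iff_not]; omega
  have hcell : pvCell (pvBoard n) i ((0 : Int) + (s : Int)) = (i + 1) * ((s : Int) + 1) := by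
    rw [pvCell_eq n i _ hi0 (by omega) (by omega) (by omega)]
    ring
  simp only [hrow, hcol, hcell, Bool.not_false, Bool.and_self]
  simp

lemma pvScan_lt (n : Int) (t : Nat) (ht : (t : Int) < n) :
    pvScan (pvBoard n) n (usedL n t) (usedL n t) =
      ((n - (t : Int)) * (n - (t : Int)), (n - (t : Int) - 1, n - (t : Int) - 1)) := by
  set c : Int := n - (t : Int) with hcdef
  have hc1 : 1 ≤ c := by omega
  unfold pvScan
  rw [PySem.List.pyRange_one, List.foldl_map]
  have hsplit : (n - 0).toNat = c.toNat + (n.toNat - c.toNat) := by omega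
  rw [hsplit, List.range_add, List.foldl_append, List.foldl_map]
  have head : ∀ (r : Nat), r ≤ c.toNat →
      (List.range r).foldl (fun acc (s : Nat) => pvScanRow (pvBoard n) n (usedL n t) (usedL n t) acc ((0 : Int) + (s : Int)))
        (-1, (-1, -1)) =
      (if r = 0 then ((-1 : Int), ((-1 : Int), (-1 : Int)))
       else ((r : Int) * c, ((r : Int) - 1, c - 1))) := by
    intro r
    induction r with
    | zero => intro _; simp
    | succ r ih =>
      intro hr
      rw [List.range_succ, List.foldl_append, List.foldl_cons, List.foldl_nil, ih (by omega)]
      have hfree : ((0 : Int) + (r : Int)) < n - (t : Int) := by omega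
      rw [pvScanRow_free n t _ _ (by positivity) hfree]
      rw [← hcdef, pureScan_eq _ (by positivity) c.toNat (by omega)]
      have hcc : ((c.toNat : Int)) = c := by omega
      rcases Nat.eq_zero_or_pos r with rfl | hr0
      · norm_num [hcc]
        omega
      · have hrne : r ≠ 0 := by omega
        simp only [hrne, if_false]
        have hlt : (r : Int) * c < ((r : Int) + 1) * c := by nlinarith
        simp only [hcc, zero_add, hlt, if_true]
        norm_num
  rw [head c.toNat le_rfl]
  have tail : ∀ (a : Int × (Int × Int)),
      (List.range (n.toNat - c.toNat)).foldl
        (fun acc (s : Nat) => pvScanRow (pvBoard n) n (usedL n t) (usedL n t) acc ((0 : Int) + ((c.toNat + s : Nat) : Int))) a = a := by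
    intro a
    have hcong := PySem.List.foldl_congr_mem' (l := List.range (n.toNat - c.toNat)) (init := a)
      (g := fun (acc : Int × (Int × Int)) (_ : Nat) => acc)
      (f := fun acc (s : Nat) => pvScanRow (pvBoard n) n (usedL n t) (usedL n t) acc ((0 : Int) + ((c.toNat + s : Nat) : Int)))
      (fun s hs acc => by
        apply pvScanRow_used
        rw [contains_usedL]
        simp only [decide_eq_true_eq]
        rw [List.mem_range] at hs
        push_cast
        omega)
    rw [hcong]
    exact PySem.List.foldl_ignore _ _
  rw [tail]
  have hc0 : c.toNat ≠ 0 := by omega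
  simp only [hc0, if_false]
  have hcc : ((c.toNat : Int)) = c := by omega
  rw [hcc]

lemma pvScan_ge (n : Int) (t : Nat) (ht : n ≤ (t : Int)) :
    pvScan (pvBoard n) n (usedL n t) (usedL n t) = (-1, (-1, -1)) := by
  unfold pvScan
  have hcong := PySem.List.foldl_congr_mem' (l := PySem.List.pyRange 0 n 1) (init := ((-1 : Int), ((-1 : Int), (-1 : Int))))
    (g := fun (acc : Int × (Int × Int)) (_ : Int) => acc)
    (f := pvScanRow (pvBoard n) n (usedL n t) (usedL n t))
    (fun i hi acc => by
      rw [PySem.List.mem_pyRange_one] at hi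
      apply pvScanRow_used
      rw [contains_usedL]
      simp only [decide_eq_true_eq]
      omega)
  rw [hcong]
  exact PySem.List.foldl_ignore _ _

lemma pvStep_lt (n : Int) (t : Nat) (ht : t < n.toNat) :
    pvStep (pvBoard n) n (posL n t, usedL n t, usedL n t) = (posL n (t + 1), usedL n (t + 1), usedL n (t + 1)) := by
  have htn : (t : Int) < n := by omega
  unfold pvStep
  simp only
  rw [pvScan_lt n t htn]
  have hne : ((n - (t : Int) - 1, n - (t : Int) - 1) : Int × Int) ≠ ((-1 : Int), (-1 : Int)) := by
    intro h
    rw [Prod.mk.injEq] at h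
    omega
  simp only [hne, ne_eq, not_false_eq_true, if_true]
  have hnm : n - (t : Int) - 1 ∉ usedL n t := by rw [mem_usedL]; omega
  have hadd : PySem.Set.add (usedL n t) (n - (t : Int) - 1) = usedL n (t + 1) := by
    rw [PySem.Set.add_of_not_mem hnm]
    unfold usedL
    rw [List.range_succ, List.map_append, List.map_singleton]
    congr 2
    omega
  refine Prod.ext ?_ (Prod.ext ?_ ?_) <;> simp only
  · unfold posL
    rw [List.range_succ, List.map_append, List.map_singleton]
    congr 2
    rw [Prod.mk.injEq]
    constructor <;> omega
  · exact hadd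
  · exact hadd

lemma pvStep_ge (n : Int) (t : Nat) (P : List (Int × Int)) (ht : n ≤ (t : Int)) :
    pvStep (pvBoard n) n (P, usedL n t, usedL n t) = (P, usedL n t, usedL n t) := by
  unfold pvStep
  simp only
  rw [pvScan_ge n t ht]
  simp

lemma loop_eq (n : Int) : ∀ (s : Nat),
    (List.range s).foldl (fun st (_ : Nat) => pvStep (pvBoard n) n st) ([], [], []) =
      (posL n (min s n.toNat), usedL n (min s n.toNat), usedL n (min s n.toNat)) := by
  intro s
  induction s with
  | zero => simp [posL, usedL]
  | succ s ih =>
    rw [List.range_succ, List.foldl_append, List.foldl_cons, List.foldl_nil, ih]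
    by_cases h : s < n.toNat
    · have h1 : min s n.toNat = s := by omega
      have h2 : min (s + 1) n.toNat = s + 1 := by omega
      rw [h1, h2]
      exact pvStep_lt n s h
    · have h1 : min s n.toNat = n.toNat := by omega
      have h2 : min (s + 1) n.toNat = n.toNat := by omega
      rw [h1, h2]
      exact pvStep_ge n n.toNat _ (by omega)

-- ===== VERDICT (by name: the statement is the Claim_ definition above) =====
theorem max_rook_sum_spec : Claim_equal_max_rook_sum := by
  intro n k _
  unfold Spec_max_rook_sum max_rook_sum max_rook_sum_alt
  simp only
  set m : Int := if min n k < 0 then 0 else min n k with hm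
  have hm0 : 0 ≤ m := by rw [hm]; split_ifs <;> omega
  have hmn : m.toNat = min k.toNat n.toNat := by rw [hm]; split_ifs <;> omega
  have hfold : (PySem.List.pyRange 0 k 1).foldl (fun st (_ : Int) => pvStep (pvBoard n) n st)
      ([], PySem.Set.empty, PySem.Set.empty) =
      (posL n m.toNat, usedL n m.toNat, usedL n m.toNat) := by
    rw [PySem.List.pyRange_one, List.foldl_map]
    have hk : (k - 0).toNat = k.toNat := by omega
    rw [hk]
    have h := loop_eq n k.toNat
    rw [show (min k.toNat n.toNat) = m.toNat by omega] at h
    exact h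
  rw [hfold]
  simp only
  have hpos : (PySem.List.pyRange 0 m 1).map (fun t => (n - 1 - t, n - 1 - t)) = posL n m.toNat := by
    rw [PySem.List.pyRange_one]
    unfold posL
    rw [List.map_map]
    have hmm : (m - 0).toNat = m.toNat := by omega
    rw [hmm]
    apply List.map_congr_left
    intro s _
    simp
  have htot : (posL n m.toNat).foldl (fun acc p => acc + pvCell (pvBoard n) p.1 p.2) 0 =
      ((PySem.List.pyRange 0 m 1).map (fun t => (n - t) * (n - t))).sum := by
    rw [PySem.List.foldl_add (g := fun p : Int × Int => pvCell (pvBoard n) p.1 p.2), zero_add]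
    rw [PySem.List.pyRange_one]
    unfold posL
    rw [List.map_map, List.map_map]
    have hmm : (m - 0).toNat = m.toNat := by omega
    rw [hmm]
    apply congrArg
    apply List.map_congr_left
    intro s hs
    rw [List.mem_range] at hs
    simp only [Function.comp]
    rw [pvCell_eq n _ _ (by omega) (by omega) (by omega) (by omega)]
    ring_nf
  rw [Prod.mk.injEq]
  exact ⟨htot, hpos.symm⟩
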